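-- pv_equiv track=rewrite | github.com/cfd-dev/PyMeshGen | delaunay/bw_core_stable.py | _find_path_in_boundary_excluding_edges
-- ===== SOURCE A (Python) =====
-- def _find_path_in_boundary_excluding_edges(adjacency, start, end, excluded_edges=None):
--     """在边界图中查找与既有路径 edge-disjoint 的另一条路径。"""
--     from collections import deque
--
--     if excluded_edges is None:
--         excluded_edges = set()
--
--     queue = deque([(start, [start])])
--     visited = {start}
--
--     while queue:
--         current, path = queue.popleft()
--
--         if current == end:
--             return path
--
--         for neighbor in adjacency.get(current, []):
--             edge = (min(current, neighbor), max(current, neighbor))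
--             if edge in excluded_edges or neighbor in visited:
--                 continue
--
--             visited.add(neighbor)
--             queue.append((neighbor, path + [neighbor]))
--
--     return None
-- ===== SOURCE B (Python) =====
-- def _find_path_in_boundary_excluding_edges(adjacency, start, end, excluded_edges=None):
--     """Frontier-at-a-time BFS with a predecessor map; the path is rebuilt once by
--     backtracking from end, instead of copying a path into every queue entry."""
--     excluded = excluded_edges if excluded_edges is not None else set()
--
--     parent = {}
--     visited = {start}
--     frontier = [start]
--
--     while frontier:
--         nxt = []
--         for current in frontier:
--             if current == end:
--                 path = []
--                 node = end
--                 while node != start: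
--                     path.append(node)
--                     node = parent[node]
--                 path.append(start)
--                 return path[::-1]
--             for nb in adjacency.get(current, []):
--                 if nb not in visited and (min(current, nb), max(current, nb)) not in excluded:
--                     visited.add(nb)
--                     parent[nb] = current
--                     nxt.append(nb)
--         frontier = nxt
--     return None
-- ===== Notes on version B (the rewrite author's own statement) =====
-- stated objective: alternative
-- what changed: B replaces A's node-at-a-time BFS that copies the whole path into every queue entry with a frontier-at-a-time BFS over bare nodes plus a predecessor map, rebuilding the path once by backtracking from end; per-enqueue path copies disappear.
import Mathlib
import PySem

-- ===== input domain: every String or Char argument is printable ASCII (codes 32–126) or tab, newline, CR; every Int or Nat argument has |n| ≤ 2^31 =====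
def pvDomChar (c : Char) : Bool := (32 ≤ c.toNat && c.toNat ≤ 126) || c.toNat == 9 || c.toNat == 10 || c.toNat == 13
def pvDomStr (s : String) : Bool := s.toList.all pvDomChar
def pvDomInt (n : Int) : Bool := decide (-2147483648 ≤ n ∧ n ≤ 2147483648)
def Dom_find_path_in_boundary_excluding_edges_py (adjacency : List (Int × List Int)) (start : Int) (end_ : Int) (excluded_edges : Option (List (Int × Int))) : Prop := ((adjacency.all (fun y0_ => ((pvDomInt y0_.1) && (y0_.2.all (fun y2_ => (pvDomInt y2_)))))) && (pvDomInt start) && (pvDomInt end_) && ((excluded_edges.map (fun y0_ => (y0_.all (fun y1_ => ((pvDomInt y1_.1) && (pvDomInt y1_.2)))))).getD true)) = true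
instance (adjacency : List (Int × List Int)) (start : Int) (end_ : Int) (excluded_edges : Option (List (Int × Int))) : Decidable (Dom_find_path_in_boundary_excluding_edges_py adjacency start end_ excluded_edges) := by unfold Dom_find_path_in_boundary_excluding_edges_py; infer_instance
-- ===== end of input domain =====

-- One honest line: B replaces A's per-entry path copies with a frontier-at-a-time BFS plus a
-- predecessor map, backtracking once from end (alternative algorithm/state, same result).

-- ===== PORT A =====
-- first-match association-list lookup = Python dict adjacency.get(current, [])
def pvAdjGet (adjacency : List (Int × List Int)) (k : Int) : List Int :=
  ((adjacency.find? (fun p => p.1 == k)).map (·.2)).getD []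

-- body of A's inner `for neighbor in adjacency.get(current, [])` loop
def pvStepA (excl : List (Int × Int)) (current : Int) (path : List Int)
    (st : List (Int × List Int) × PySem.Set Int) (neighbor : Int) :
    List (Int × List Int) × PySem.Set Int :=
  if excl.contains (min current neighbor, max current neighbor) || st.2.contains neighbor then st
  else (st.1 ++ [(neighbor, path ++ [neighbor])], PySem.Set.add st.2 neighbor)

-- BFS loop of A: queue of (node, path); the fuel argument only makes the loop total
-- (2 + total adjacency-list length bounds the pops: 1 initial entry + ≤ 1 enqueue per listed neighbor).
def pvLoopA (adjacency : List (Int × List Int)) (end_ : Int) (excl : List (Int × Int)) :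
    Nat → List (Int × List Int) → PySem.Set Int → Option (List Int)
  | 0, _, _ => none
  | _ + 1, [], _ => none
  | fuel + 1, (current, path) :: qs, visited =>
    if current = end_ then some path
    else
      let st := (pvAdjGet adjacency current).foldl (pvStepA excl current path) (qs, visited)
      pvLoopA adjacency end_ excl fuel st.1 st.2

def pvFuel (adjacency : List (Int × List Int)) : Nat :=
  2 + (adjacency.map (fun p => p.2.length)).sum

def find_path_in_boundary_excluding_edges_py (adjacency : List (Int × List Int)) (start : Int) (end_ : Int) (excluded_edges : Option (List (Int × Int))) : Option (List Int) :=
  pvLoopA adjacency end_ (excluded_edges.getD []) (pvFuel adjacency) [(start, [start])] (PySem.Set.ofList [start])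

-- ===== PORT B =====
-- first-match lookup in the predecessor map (python's parent[node]; keys are unique by construction)
def pvParentLookup (parent : List (Int × Int)) (k : Int) : Option Int :=
  (parent.find? (fun p => p.1 == k)).map (·.2)

-- python B's `while node != start: path.append(node); node = parent[node]` plus the final
-- append of start and the reversal: cons-accumulation builds path[::-1] directly.
-- The fuel argument and the `.getD 0` default only make it total; when end was reached the
-- parent chain exists and is shorter than the fuel supplied, so neither is ever hit.
def pvBacktrack (parent : List (Int × Int)) (start : Int) : Nat → Int → List Int → List Int
  | 0, _, acc => acc
  | fuel + 1, node, acc =>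
    if node = start then start :: acc
    else pvBacktrack parent start fuel ((pvParentLookup parent node).getD 0) (node :: acc)

-- body of B's inner neighbor loop: mark, record the predecessor, put on the next frontier
def pvExpand (excl : List (Int × Int)) (current : Int)
    (st : List Int × List (Int × Int) × PySem.Set Int) (nb : Int) :
    List Int × List (Int × Int) × PySem.Set Int :=
  if !st.2.2.contains nb && !excl.contains (min current nb, max current nb) then
    (st.1 ++ [nb], st.2.1 ++ [(nb, current)], PySem.Set.add st.2.2 nb)
  else st

-- frontier-at-a-time BFS of B; fuel decreases once per processed node (same bound as A's loop)
-- and swapping in the next frontier costs none (the frontier goes from [] to nonempty).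
def pvLoopB (adjacency : List (Int × List Int)) (end_ : Int) (excl : List (Int × Int)) (start : Int) :
    Nat → List Int → List Int → List (Int × Int) → PySem.Set Int → Option (List Int)
  | _, [], [], _, _ => none
  | fuel, [], n :: nxt, parent, visited =>
    pvLoopB adjacency end_ excl start fuel (n :: nxt) [] parent visited
  | 0, _ :: _, _, _, _ => none
  | fuel + 1, current :: rest, nxt, parent, visited =>
    if current = end_ then some (pvBacktrack parent start (parent.length + 1) current [])
    else
      let st := (pvAdjGet adjacency current).foldl (pvExpand excl current) (nxt, parent, visited)
      pvLoopB adjacency end_ excl start fuel rest st.1 st.2.1 st.2.2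
  termination_by fuel frontier _ _ _ => (fuel, if frontier.isEmpty then 1 else 0)

def find_path_in_boundary_excluding_edges_py_alt (adjacency : List (Int × List Int)) (start : Int) (end_ : Int) (excluded_edges : Option (List (Int × Int))) : Option (List Int) :=
  pvLoopB adjacency end_ (excluded_edges.getD []) start (pvFuel adjacency) [start] [] [] (PySem.Set.ofList [start])

-- ===== PRECONDITION & SPEC =====
def Spec_find_path_in_boundary_excluding_edges_py (adjacency : List (Int × List Int)) (start : Int) (end_ : Int) (excluded_edges : Option (List (Int × Int))) (out : Option (List Int)) : Prop := out = find_path_in_boundary_excluding_edges_py_alt adjacency start end_ excluded_edges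
instance (adjacency : List (Int × List Int)) (start : Int) (end_ : Int) (excluded_edges : Option (List (Int × Int))) (out : Option (List Int)) : Decidable (Spec_find_path_in_boundary_excluding_edges_py adjacency start end_ excluded_edges out) := by unfold Spec_find_path_in_boundary_excluding_edges_py; infer_instance

-- ===== CLAIM (what is proved, stated in full; the proofs are below) =====
def Claim_equal_find_path_in_boundary_excluding_edges_py : Prop := ∀ (adjacency : List (Int × List Int)) (start : Int) (end_ : Int) (excluded_edges : Option (List (Int × Int))), Dom_find_path_in_boundary_excluding_edges_py adjacency start end_ excluded_edges → Spec_find_path_in_boundary_excluding_edges_py adjacency start end_ excluded_edges (find_path_in_boundary_excluding_edges_py adjacency start end_ excluded_edges)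

-- ===== LEMMAS AND PROOFS =====

-- the predecessor chain of B: pvChain parent start n p says p = [start, ..., n] follows parent links
inductive pvChain (parent : List (Int × Int)) (start : Int) : Int → List Int → Prop
  | base : pvChain parent start start [start]
  | step {n m : Int} {p : List Int} : pvChain parent start m p → n ≠ start →
      pvParentLookup parent n = some m → pvChain parent start n (p ++ [n])

theorem pvParentLookup_append_of_isSome (parent l : List (Int × Int)) (k : Int)
    (h : (pvParentLookup parent k).isSome = true) :
    pvParentLookup (parent ++ l) k = pvParentLookup parent k := by
  unfold pvParentLookup at *
  rw [List.find?_append]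
  cases hf : parent.find? (fun p => p.1 == k) with
  | none => rw [hf] at h; simp at h
  | some v => simp

theorem pvParentLookup_isSome_append (parent l : List (Int × Int)) (k : Int)
    (h : (pvParentLookup (parent ++ l) k).isSome = true) :
    (pvParentLookup parent k).isSome = true ∨ (pvParentLookup l k).isSome = true := by
  unfold pvParentLookup at *
  rw [List.find?_append] at h
  cases hf : parent.find? (fun p => p.1 == k) with
  | none =>
      rw [hf] at h
      exact Or.inr (by simpa using h)
  | some v => exact Or.inl (by simp)

theorem pvChain_append {parent : List (Int × Int)} {start n : Int} {p : List Int}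
    (h : pvChain parent start n p) (l : List (Int × Int)) :
    pvChain (parent ++ l) start n p := by
  induction h with
  | base => exact pvChain.base
  | step hc hne hl ih =>
      exact pvChain.step ih hne
        (by rw [pvParentLookup_append_of_isSome parent l _ (by simp [hl])]; exact hl)

theorem pvChain_lookup_isSome {parent : List (Int × Int)} {start n : Int} {p : List Int}
    (h : pvChain parent start n p) :
    ∀ x ∈ p, x ≠ start → (pvParentLookup parent x).isSome = true := by
  induction h with
  | base => intro x hx hne; simp at hx; exact absurd hx hne
  | step hc hne hl ih =>
      intro x hx hxne
      rcases List.mem_append.1 hx with h1 | h2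
      · exact ih x h1 hxne
      · simp at h2; subst h2; simp [hl]

theorem pvBacktrack_chain {parent : List (Int × Int)} {start n : Int} {p : List Int}
    (h : pvChain parent start n p) :
    ∀ (acc : List Int) (f : Nat), p.length ≤ f →
      pvBacktrack parent start f n acc = p ++ acc := by
  induction h with
  | base =>
      intro acc f hf
      match f, hf with
      | f + 1, _ => simp [pvBacktrack]
  | @step n m p hc hne hl ih =>
      intro acc f hf
      simp at hf
      match f, hf with
      | f + 1, _ =>
        have hstep : pvBacktrack parent start (f + 1) n acc
            = pvBacktrack parent start f m (n :: acc) := by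
          simp [pvBacktrack, hne, hl]
        rw [hstep, ih (n :: acc) f (by omega)]
        simp

theorem pvChain_length_le {parent : List (Int × Int)} {start n : Int} {p : List Int}
    (h : pvChain parent start n p) (hnd : p.Nodup) :
    p.length ≤ parent.length + 1 := by
  have hsub : (p.filter (fun x => !(x == start))) ⊆ parent.map Prod.fst := by
    intro x hx
    have hxp := List.mem_filter.1 hx
    have hne : x ≠ start := by simpa using hxp.2
    have hs := pvChain_lookup_isSome h x hxp.1 hne
    unfold pvParentLookup at hs
    rw [Option.isSome_map] at hs
    rcases Option.isSome_iff_exists.1 hs with ⟨pr, hpr⟩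
    have hmem := List.mem_of_find?_eq_some hpr
    have hkey : pr.1 = x := by simpa using List.find?_some hpr
    exact List.mem_map.2 ⟨pr, hmem, hkey⟩
  have h1 : (p.filter (fun x => !(x == start))).length ≤ parent.length := by
    have := (List.Nodup.subperm (hnd.filter _) hsub).length_le
    simpa using this
  have h2 : (p.filter (fun x => x == start)).length ≤ 1 := by
    rw [← List.countP_eq_length_filter]
    have := (List.nodup_iff_count_le_one.1 hnd) start
    simpa [List.count] using this
  have h3 := List.length_eq_length_filter_add (l := p) (fun x => x == start)
  omega

-- the coupling invariant: A's queue of (node, path) entries matches B's current frontier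
-- followed by B's next frontier, entry for node, with the path a predecessor chain
def pvInv (start : Int) (parent : List (Int × Int)) (visited : PySem.Set Int)
    (qA : List (Int × List Int)) (qB : List Int) : Prop :=
  List.Forall₂ (fun (e : Int × List Int) (n : Int) =>
    e.1 = n ∧ pvChain parent start n e.2 ∧ e.2.Nodup ∧ ∀ x ∈ e.2, x ∈ visited) qA qB
  ∧ (∀ k : Int, (pvParentLookup parent k).isSome = true → k ∈ visited)
  ∧ start ∈ visited

theorem pvFold_eq (excl : List (Int × Int)) (start current : Int) (path : List Int)
    (rest : List Int) :
    ∀ (l : List Int) (qA : List (Int × List Int)) (nxt : List Int)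
      (parent : List (Int × Int)) (visited : PySem.Set Int),
    pvInv start parent visited qA (rest ++ nxt) →
    pvChain parent start current path → path.Nodup → (∀ x ∈ path, x ∈ visited) →
    (l.foldl (pvStepA excl current path) (qA, visited)).2
      = (l.foldl (pvExpand excl current) (nxt, parent, visited)).2.2
    ∧ pvInv start
        (l.foldl (pvExpand excl current) (nxt, parent, visited)).2.1
        (l.foldl (pvExpand excl current) (nxt, parent, visited)).2.2
        (l.foldl (pvStepA excl current path) (qA, visited)).1
        (rest ++ (l.foldl (pvExpand excl current) (nxt, parent, visited)).1) := by
  intro l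
  induction l with
  | nil => intro qA nxt parent visited hInv hc hnd hsub; exact ⟨rfl, hInv⟩
  | cons x l ih =>
      intro qA nxt parent visited hInv hc hnd hsub
      rw [List.foldl_cons, List.foldl_cons]
      by_cases hcond :
          (excl.contains (min current x, max current x) || visited.contains x) = true
      · have hA : pvStepA excl current path (qA, visited) x = (qA, visited) := by
          simp only [pvStepA]; rw [if_pos hcond]
        have hB : pvExpand excl current (nxt, parent, visited) x = (nxt, parent, visited) := by
          have hfalse : (!visited.contains x
              && !excl.contains (min current x, max current x)) = false := by
            cases hv : visited.contains x
            · cases he : excl.contains (min current x, max current x)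
              · rw [hv, he] at hcond; simp at hcond
              · simp
            · simp
          unfold pvExpand
          rw [hfalse]
          simp
        rw [hA, hB]
        exact ih qA nxt parent visited hInv hc hnd hsub
      · have hA : pvStepA excl current path (qA, visited) x
            = (qA ++ [(x, path ++ [x])], PySem.Set.add visited x) := by
          simp only [pvStepA]; rw [if_neg hcond]
        have hB : pvExpand excl current (nxt, parent, visited) x
            = (nxt ++ [x], parent ++ [(x, current)], PySem.Set.add visited x) := by
          have hv : visited.contains x = false := by
            cases h : visited.contains x
            · rfl
            · exact absurd (by rw [h]; exact Bool.or_true _) hcond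
          have he : excl.contains (min current x, max current x) = false := by
            cases h : excl.contains (min current x, max current x)
            · rfl
            · exact absurd (by rw [h]; rfl) hcond
          have htrue : (!visited.contains x
              && !excl.contains (min current x, max current x)) = true := by
            rw [hv, he]; rfl
          unfold pvExpand
          rw [htrue]
          simp
        rw [hA, hB]
        have hxv : x ∉ visited := by
          intro hx
          exact hcond (by simp; exact Or.inr hx)
        have hxs : x ≠ start := fun h => hxv (h ▸ hInv.2.2)
        have hlk : pvParentLookup parent x = none := by
          cases hl : pvParentLookup parent x with
          | none => rfl
          | some v => exact absurd (hInv.2.1 x (by simp [hl])) hxv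
        have hlk' : pvParentLookup (parent ++ [(x, current)]) x = some current := by
          unfold pvParentLookup at *
          rw [List.find?_append]
          cases hf : parent.find? (fun p => p.1 == x) with
          | none => simp [List.find?]
          | some v => rw [hf] at hlk; simp at hlk
        have hmemadd : ∀ y : Int, y ∈ visited → y ∈ PySem.Set.add visited x := by
          intro y hy; exact (PySem.Set.mem_add _ _ _).2 (Or.inl hy)
        have hxadd : x ∈ PySem.Set.add visited x := (PySem.Set.mem_add _ _ _).2 (Or.inr rfl)
        have hInv' : pvInv start (parent ++ [(x, current)]) (PySem.Set.add visited x)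
            (qA ++ [(x, path ++ [x])]) (rest ++ (nxt ++ [x])) := by
          rw [← List.append_assoc]
          refine ⟨List.rel_append (List.Forall₂.imp ?_ hInv.1) ?_, ?_, hmemadd _ hInv.2.2⟩
          · rintro e n ⟨h1, h2, h3, h4⟩
            exact ⟨h1, pvChain_append h2 _, h3, fun y hy => hmemadd _ (h4 y hy)⟩
          · refine List.Forall₂.cons ⟨rfl, ?_, ?_, ?_⟩ List.Forall₂.nil
            · exact pvChain.step (pvChain_append hc _) hxs hlk'
            · exact List.Nodup.append hnd (List.nodup_singleton x)
                (by intro a ha hax; simp at hax; subst hax; exact hxv (hsub a ha))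
            · intro y hy
              rcases List.mem_append.1 hy with h1 | h2
              · exact hmemadd _ (hsub y h1)
              · simp at h2; subst h2; exact hxadd
          · intro k hk
            rcases pvParentLookup_isSome_append parent _ k hk with h1 | h2
            · exact hmemadd _ (hInv.2.1 k h1)
            · have hkx : k = x := by
                unfold pvParentLookup at h2
                rw [Option.isSome_map] at h2
                rcases Option.isSome_iff_exists.1 h2 with ⟨pr, hpr⟩
                have hfs := List.find?_some hpr
                have hm := List.mem_of_find?_eq_some hpr
                simp at hm
                subst hm
                exact (by simpa using hfs : x = k).symm
              subst hkx; exact hxadd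
        exact ih _ _ _ _ hInv' (pvChain_append hc _) hnd (fun y hy => hmemadd _ (hsub y hy))

theorem pvLoop_eq (adjacency : List (Int × List Int)) (end_ : Int)
    (excl : List (Int × Int)) (start : Int) :
    ∀ (fuel : Nat) (qA : List (Int × List Int)) (frontier nxt : List Int)
      (parent : List (Int × Int)) (visited : PySem.Set Int),
    pvInv start parent visited qA (frontier ++ nxt) →
    pvLoopA adjacency end_ excl fuel qA visited
      = pvLoopB adjacency end_ excl start fuel frontier nxt parent visited := by
  intro fuel
  induction fuel with
  | zero =>
      intro qA frontier nxt parent visited _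
      have hA : pvLoopA adjacency end_ excl 0 qA visited = none := by
        cases qA with
        | nil => rfl
        | cons e qs => obtain ⟨c, p⟩ := e; rfl
      rw [hA]
      cases frontier with
      | nil => cases nxt with
        | nil => simp [pvLoopB]
        | cons n t => simp [pvLoopB]
      | cons c rest => simp [pvLoopB]
  | succ fuel ih =>
      have key : ∀ (c : Int) (rest nxt : List Int) (qA : List (Int × List Int))
          (parent : List (Int × Int)) (visited : PySem.Set Int),
          pvInv start parent visited qA ((c :: rest) ++ nxt) →
          pvLoopA adjacency end_ excl (fuel + 1) qA visited
            = pvLoopB adjacency end_ excl start (fuel + 1) (c :: rest) nxt parent visited := by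
        intro c rest nxt qA parent visited hInv
        obtain ⟨hF, hP, hS⟩ := hInv
        cases hF with
        | cons hrel hrest =>
          rename_i e qAs
          obtain ⟨cc, p⟩ := e
          obtain ⟨h1, h2, h3, h4⟩ := hrel
          dsimp only at h1 h2 h3 h4
          subst h1
          by_cases hend : cc = end_
          · subst hend
            have hlen : p.length ≤ parent.length + 1 := pvChain_length_le h2 h3
            have hr := pvBacktrack_chain h2 [] (parent.length + 1) hlen
            simp [pvLoopA, pvLoopB, hr]
          · have hInv' : pvInv start parent visited qAs (rest ++ nxt) := ⟨hrest, hP, hS⟩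
            have hfold := pvFold_eq excl start cc p rest (pvAdjGet adjacency cc)
              qAs nxt parent visited hInv' h2 h3 h4
            rw [pvLoopA, pvLoopB]
            simp only [if_neg hend]
            rw [hfold.1]
            exact ih _ _ _ _ _ hfold.2
      intro qA frontier nxt parent visited hInv
      cases frontier with
      | nil =>
        cases nxt with
        | nil =>
          cases hInv.1
          simp [pvLoopA, pvLoopB]
        | cons n t =>
          have hswap : pvLoopB adjacency end_ excl start (fuel + 1) [] (n :: t) parent visited
              = pvLoopB adjacency end_ excl start (fuel + 1) (n :: t) [] parent visited := by
            conv_lhs => rw [pvLoopB]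
          rw [hswap]
          exact key n t [] qA parent visited (by simpa using hInv)
      | cons c rest => exact key c rest nxt qA parent visited hInv

-- ===== VERDICT (by name: the statement is the Claim_ definition above) =====
theorem find_path_in_boundary_excluding_edges_py_spec : Claim_equal_find_path_in_boundary_excluding_edges_py := by
  intro adjacency start end_ excluded_edges _
  unfold Spec_find_path_in_boundary_excluding_edges_py
  unfold find_path_in_boundary_excluding_edges_py find_path_in_boundary_excluding_edges_py_alt
  apply pvLoop_eq
  have hmem : start ∈ PySem.Set.ofList [start] := (PySem.Set.mem_ofList _ _).2 (by simp)
  refine ⟨List.Forall₂.cons ⟨rfl, pvChain.base, List.nodup_singleton start, ?_⟩ List.Forall₂.nil,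
    ?_, hmem⟩
  · intro x hx; simp at hx; subst hx; exact hmem
  · intro k hk; simp [pvParentLookup] at hk
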